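-- pv_equiv track=rewrite | github.com/avnerelbaz3500/Linguistic-analysis- | src/InfoNCE/TestNCE.py | build_base_ldb
-- ===== SOURCE A (Python) =====
-- from typing import List, Dict, Any, Tuple
--
-- def build_base_ldb(data: List[dict], group_size: int = 3):
--     """
--     Extract aligned base / LDB with group sampling.
--
--     Assumes data is structured in repeated blocks of size `group_size`,
--     and we only keep the first element of each block.
--     """
--
--     base = [
--         data[i]["base"]
--         for i in range(0, len(data), group_size)
--         if "base" in data[i]
--     ]
--
--     ldb = [
--         data[i]["ldb"]
--         for i in range(0, len(data), group_size)
--         if "ldb" in data[i]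
--     ]
--
--     return base, ldb
-- ===== SOURCE B (Python) =====
-- def build_base_ldb(data, group_size=3):
--     # Single element-wise pass with a skip countdown: no index arithmetic,
--     # no range(); the first element of each block is taken when the
--     # countdown hits zero.  A non-positive countdown step samples nothing.
--     base, ldb = [], []
--     if group_size > 0:
--         countdown = 0
--         for d in data:
--             if countdown == 0:
--                 if "base" in d:
--                     base.append(d["base"])
--                 if "ldb" in d:
--                     ldb.append(d["ldb"])
--                 countdown = group_size - 1
--             else:
--                 countdown -= 1
--     return base, ldb
-- ===== Notes on version B (the rewrite author's own statement) =====
-- stated objective: alternative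
-- what changed: A strides over computed indices range(0, len(data), group_size) in two independent comprehensions; B makes one element-wise pass over data itself with a skip-countdown state variable, appending to both accumulators, with no indexing or range at all.
import Mathlib
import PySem

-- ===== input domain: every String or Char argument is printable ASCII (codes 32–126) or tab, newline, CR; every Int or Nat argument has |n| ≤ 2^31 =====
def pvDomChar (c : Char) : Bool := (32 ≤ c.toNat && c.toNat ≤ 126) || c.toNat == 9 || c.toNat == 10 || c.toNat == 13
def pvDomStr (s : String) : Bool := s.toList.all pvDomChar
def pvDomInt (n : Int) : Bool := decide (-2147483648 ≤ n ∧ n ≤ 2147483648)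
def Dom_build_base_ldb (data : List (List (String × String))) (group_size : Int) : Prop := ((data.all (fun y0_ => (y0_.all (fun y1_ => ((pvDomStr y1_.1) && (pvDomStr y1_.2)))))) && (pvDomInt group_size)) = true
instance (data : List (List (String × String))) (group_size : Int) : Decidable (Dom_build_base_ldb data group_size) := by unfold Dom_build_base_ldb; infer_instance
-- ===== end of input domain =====

-- B replaces A's two stride-indexed comprehensions by one element-wise pass over
-- the list with a skip-countdown accumulator (objective: alternative; no indexing).


-- dict lookup on an association list: first match (exact Python dict semantics here)
def dictGet? (d : List (String × String)) (k : String) : Option String :=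
  (d.find? (fun p => p.1 == k)).map (·.2)

-- ===== PORT A =====
-- two comprehensions over range(0, len(data), group_size), each with its own key test
def build_base_ldb (data : List (List (String × String))) (group_size : Int) : List String × List String :=
  let base := (PySem.List.pyRange 0 (data.length : Int) group_size).foldl
    (fun acc i =>
      match dictGet? (PySem.List.pyGetD data i []) "base" with
      | some v => acc ++ [v]
      | none => acc) []
  let ldb := (PySem.List.pyRange 0 (data.length : Int) group_size).foldl
    (fun acc i =>
      match dictGet? (PySem.List.pyGetD data i []) "ldb" with
      | some v => acc ++ [v]
      | none => acc) []
  (base, ldb)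

-- ===== PORT B =====
-- one element-wise pass, state (base, ldb, countdown); process an element when countdown == 0
def build_base_ldb_alt (data : List (List (String × String))) (group_size : Int) : List String × List String :=
  if group_size > 0 then
    let r := data.foldl
      (fun (acc : List String × List String × Int) d =>
        if acc.2.2 == 0 then
          ((match dictGet? d "base" with | some v => acc.1 ++ [v] | none => acc.1),
           (match dictGet? d "ldb" with | some v => acc.2.1 ++ [v] | none => acc.2.1),
           group_size - 1)
        else (acc.1, acc.2.1, acc.2.2 - 1))
      ([], [], 0)
    (r.1, r.2.1)
  else ([], [])

-- ===== PRECONDITION & SPEC =====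
-- Python's range raises ValueError when the step is zero; that is the only input A raises on
def Pre_build_base_ldb (data : List (List (String × String))) (group_size : Int) : Prop := group_size ≠ 0
instance (data : List (List (String × String))) (group_size : Int) : Decidable (Pre_build_base_ldb data group_size) := by unfold Pre_build_base_ldb; infer_instance
def pvWitness_build_base_ldb : (List (List (String × String))) × Int := ([[("base", "a")], [("ldb", "b")]], 1)

def Spec_build_base_ldb (data : List (List (String × String))) (group_size : Int) (out : List String × List String) : Prop := out = build_base_ldb_alt data group_size
instance (data : List (List (String × String))) (group_size : Int) (out : List String × List String) : Decidable (Spec_build_base_ldb data group_size out) := by unfold Spec_build_base_ldb; infer_instance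

-- ===== CLAIM (what is proved, stated in full; the proofs are below) =====
def Claim_equal_build_base_ldb : Prop := ∀ (data : List (List (String × String))) (group_size : Int), Dom_build_base_ldb data group_size → Pre_build_base_ldb data group_size → Spec_build_base_ldb data group_size (build_base_ldb data group_size)

-- ===== LEMMAS AND PROOFS =====

-- the sampled sublist: first element, then recurse after skipping g further elements
def sample {α : Type} (g : Nat) : List α → List α
  | [] => []
  | d :: rest => d :: sample g (rest.drop g)
termination_by l => l.length
decreasing_by simp [List.length_drop]

theorem pyRange_pos_nil (a b g : Int) (hg : 0 < g) (h : b ≤ a) :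
    PySem.List.pyRange a b g = [] := by
  rw [PySem.List.pyRange_of_pos _ _ hg]
  simp [not_lt.mpr h]

theorem pyRange_pos_cons (a b g : Int) (hg : 0 < g) (hab : a < b) :
    PySem.List.pyRange a b g = a :: PySem.List.pyRange (a + g) b g := by
  rw [PySem.List.pyRange_of_pos _ _ hg, PySem.List.pyRange_of_pos _ _ hg]
  have hsplit : (b - a + g - 1) / g = (b - a - 1) / g + 1 := by
    have : b - a + g - 1 = (b - a - 1) + 1 * g := by ring
    rw [this, Int.add_mul_ediv_right _ _ (by omega : g ≠ 0)]
  have hnn : 0 ≤ (b - a - 1) / g := Int.ediv_nonneg (by omega) (by omega)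
  have hcount : (if a < b then ((b - a + g - 1) / g).toNat else 0)
      = (if a + g < b then ((b - (a + g) + g - 1) / g).toNat else 0) + 1 := by
    rw [if_pos hab, hsplit]
    by_cases h2 : a + g < b
    · rw [if_pos h2]
      have : b - (a + g) + g - 1 = b - a - 1 := by ring
      rw [this]; omega
    · rw [if_neg h2]
      have : (b - a - 1) / g = 0 := Int.ediv_eq_zero_of_lt (by omega) (by omega)
      omega
  rw [hcount, List.range_succ_eq_map, List.map_cons, List.map_map]
  have : ((fun k : Nat => a + g * (k : Int)) ∘ Nat.succ) = fun k : Nat => (a + g) + g * (k : Int) := by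
    funext k; simp [Function.comp]; ring
  rw [this]
  simp

theorem map_pyRange_sample {α : Type} (data : List α) (d0 : α) (g : Int) (hg : 0 < g) :
    ∀ (n : Nat) (a : Int), 0 ≤ a → data.length - a.toNat ≤ n →
    (PySem.List.pyRange a (data.length : Int) g).map (fun i => PySem.List.pyGetD data i d0)
      = sample (g - 1).toNat (data.drop a.toNat) := by
  intro n
  induction n with
  | zero =>
    intro a ha hle
    rw [pyRange_pos_nil _ _ _ hg (by omega), List.drop_eq_nil_of_le (by omega)]
    simp [sample]
  | succ n ih =>
    intro a ha hle
    by_cases hlt : a < (data.length : Int)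
    · have hidx : a.toNat < data.length := by omega
      rw [pyRange_pos_cons _ _ _ hg hlt, List.map_cons,
          PySem.List.pyGetD_eq_getElem data d0 ha hlt,
          List.drop_eq_getElem_cons hidx]
      simp only [sample]
      congr 1
      have ht : (a + g).toNat = a.toNat + 1 + (g - 1).toNat := by omega
      rw [List.drop_drop, ih (a + g) (by omega) (by rw [ht]; omega), ht]
    · rw [pyRange_pos_nil _ _ _ hg (by omega), List.drop_eq_nil_of_le (by omega)]
      simp [sample]

theorem skipB (g : Int) :
    ∀ (data : List (List (String × String))) (k : Nat) (c : Int), c = (k : Int) → ∀ (b l : List String),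
    ((data.foldl
      (fun (acc : List String × List String × Int) d =>
        if acc.2.2 == 0 then
          ((match dictGet? d "base" with | some v => acc.1 ++ [v] | none => acc.1),
           (match dictGet? d "ldb" with | some v => acc.2.1 ++ [v] | none => acc.2.1),
           g - 1)
        else (acc.1, acc.2.1, acc.2.2 - 1)) (b, l, c)).1,
     (data.foldl
      (fun (acc : List String × List String × Int) d =>
        if acc.2.2 == 0 then
          ((match dictGet? d "base" with | some v => acc.1 ++ [v] | none => acc.1),
           (match dictGet? d "ldb" with | some v => acc.2.1 ++ [v] | none => acc.2.1),
           g - 1)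
        else (acc.1, acc.2.1, acc.2.2 - 1)) (b, l, c)).2.1)
    = (((data.drop k).foldl
      (fun (acc : List String × List String × Int) d =>
        if acc.2.2 == 0 then
          ((match dictGet? d "base" with | some v => acc.1 ++ [v] | none => acc.1),
           (match dictGet? d "ldb" with | some v => acc.2.1 ++ [v] | none => acc.2.1),
           g - 1)
        else (acc.1, acc.2.1, acc.2.2 - 1)) (b, l, 0)).1,
       ((data.drop k).foldl
      (fun (acc : List String × List String × Int) d =>
        if acc.2.2 == 0 then
          ((match dictGet? d "base" with | some v => acc.1 ++ [v] | none => acc.1),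
           (match dictGet? d "ldb" with | some v => acc.2.1 ++ [v] | none => acc.2.1),
           g - 1)
        else (acc.1, acc.2.1, acc.2.2 - 1)) (b, l, 0)).2.1) := by
  intro data
  induction data with
  | nil => intro k c hc b l; simp
  | cons d rest ih =>
    intro k c hc b l
    subst hc
    cases k with
    | zero => norm_num
    | succ j =>
      have hc0 : (((j + 1 : Nat) : Int) == 0) = false := by
        simp [beq_eq_false_iff_ne]; omega
      simp only [List.foldl_cons, hc0, Bool.false_eq_true, if_false]
      have hdec : ((j + 1 : Nat) : Int) - 1 = (j : Int) := by push_cast; ring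
      rw [hdec, List.drop_succ_cons]
      exact ih j j rfl b l

theorem fold_countdown_sample (g : Int) (hg : 0 < g) :
    ∀ (n : Nat) (data : List (List (String × String))), data.length ≤ n → ∀ (b l : List String),
    ((data.foldl
      (fun (acc : List String × List String × Int) d =>
        if acc.2.2 == 0 then
          ((match dictGet? d "base" with | some v => acc.1 ++ [v] | none => acc.1),
           (match dictGet? d "ldb" with | some v => acc.2.1 ++ [v] | none => acc.2.1),
           g - 1)
        else (acc.1, acc.2.1, acc.2.2 - 1)) (b, l, 0)).1,
     (data.foldl
      (fun (acc : List String × List String × Int) d =>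
        if acc.2.2 == 0 then
          ((match dictGet? d "base" with | some v => acc.1 ++ [v] | none => acc.1),
           (match dictGet? d "ldb" with | some v => acc.2.1 ++ [v] | none => acc.2.1),
           g - 1)
        else (acc.1, acc.2.1, acc.2.2 - 1)) (b, l, 0)).2.1)
    = ((sample (g - 1).toNat data).foldl
        (fun acc d => match dictGet? d "base" with | some v => acc ++ [v] | none => acc) b,
       (sample (g - 1).toNat data).foldl
        (fun acc d => match dictGet? d "ldb" with | some v => acc ++ [v] | none => acc) l) := by
  intro n
  induction n with
  | zero =>
    intro data hlen b l
    have : data = [] := List.length_eq_zero_iff.mp (Nat.le_zero.mp hlen)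
    subst this
    simp [sample]
  | succ n ih =>
    intro data hlen b l
    cases data with
    | nil => simp [sample]
    | cons d rest =>
      simp only [List.foldl_cons, sample]
      have h0 : (((0 : Int)) == 0) = true := by decide
      simp only [h0, if_true]
      rw [skipB g rest (g - 1).toNat (g - 1) (by omega) _ _]
      exact ih (rest.drop (g - 1).toNat) (by simp at hlen ⊢; omega) _ _

-- ===== VERDICT (by name: the statement is the Claim_ definition above) =====
theorem build_base_ldb_spec : Claim_equal_build_base_ldb := by
  intro data g _ hpre
  unfold Spec_build_base_ldb build_base_ldb build_base_ldb_alt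
  rcases lt_trichotomy g 0 with hneg | hzero | hpos
  · have h1 : PySem.List.pyRange 0 (data.length : Int) g = [] := by
      unfold PySem.List.pyRange
      rw [if_neg (by omega : ¬ g = 0)]
      simp only [not_lt.mpr (le_of_lt hneg), if_false]
      rw [if_neg (by omega : ¬ (data.length : Int) < 0)]
      simp
    rw [h1, if_neg (by omega : ¬ g > 0)]
    rfl
  · exact absurd hzero hpre
  · rw [if_pos hpos]
    dsimp only
    have hmap := map_pyRange_sample data ([] : List (String × String)) g hpos data.length 0 le_rfl (by omega)
    rw [Int.toNat_zero, List.drop_zero] at hmap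
    have hA : ∀ (key : String),
        (PySem.List.pyRange 0 (data.length : Int) g).foldl
          (fun acc i => match dictGet? (PySem.List.pyGetD data i []) key with
            | some v => acc ++ [v] | none => acc) []
        = (sample (g - 1).toNat data).foldl
          (fun acc d => match dictGet? d key with | some v => acc ++ [v] | none => acc) [] := by
      intro key
      rw [← hmap, List.foldl_map]
    rw [hA "base", hA "ldb"]
    exact (fold_countdown_sample g hpos data.length data le_rfl [] []).symm
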